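-- pv_equiv track=rewrite | github.com/jasnyder/advent2020 | day6/code.py | question_dict
-- ===== SOURCE A (Python) =====
-- def question_dict(group):
--     d = dict()
--     for personID, answers in enumerate(group):
--         for a in answers:
--             if a in d.keys():
--                 d[a].append(personID)
--             else:
--                 d[a] = [personID]
--     return d
-- ===== SOURCE B (Python) =====
-- def question_dict(group):
--     # Two-pass: flatten to (answer, personID) pairs, then one filter per distinct answer.
--     pairs = [(a, pid) for pid, answers in enumerate(group) for a in answers]
--     keys = list(dict.fromkeys(a for a, _ in pairs))
--     return {k: [pid for a, pid in pairs if a == k] for k in keys}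
-- ===== Notes on version B (the rewrite author's own statement) =====
-- stated objective: alternative
-- what changed: Replaces A's online dict accumulation (membership test + append/insert per character) with a two-pass decomposition: flatten the group to (answer, personID) pairs, dedup the answers in first-occurrence order, then build each answer's ID list by one filter over the flat pair list.
import Mathlib
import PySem

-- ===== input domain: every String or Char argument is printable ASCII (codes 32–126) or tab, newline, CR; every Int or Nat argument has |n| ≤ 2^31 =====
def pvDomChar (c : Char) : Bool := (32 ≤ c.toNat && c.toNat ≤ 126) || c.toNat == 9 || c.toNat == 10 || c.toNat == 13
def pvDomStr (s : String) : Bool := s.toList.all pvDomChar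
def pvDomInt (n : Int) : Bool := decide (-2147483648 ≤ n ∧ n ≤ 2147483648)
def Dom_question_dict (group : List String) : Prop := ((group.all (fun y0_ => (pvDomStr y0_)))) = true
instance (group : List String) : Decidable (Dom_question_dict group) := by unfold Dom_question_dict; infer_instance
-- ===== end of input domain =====

-- B replaces A's online dict accumulation with a flatten–dedup–filter two-pass decomposition (same cost class, different structure).


-- ===== PORT A =====
def question_dict (group : List String) : List (String × List Int) :=
  ((PySem.List.enumerate group).foldl
    (fun d pa => pa.2.toList.foldl
      (fun d a =>
        if d.contains (String.singleton a) then
          d.modify (String.singleton a) [] (fun l => l ++ [pa.1])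
        else
          d.insert (String.singleton a) [pa.1])
      d)
    PySem.Dict.empty).items

-- ===== PORT B =====
def question_dict_alt (group : List String) : List (String × List Int) :=
  let pairs := (PySem.List.enumerate group).flatMap
    (fun pa => pa.2.toList.map (fun a => (String.singleton a, pa.1)))
  let keys := PySem.List.dedup (pairs.map (fun p => p.1))
  keys.map (fun k => (k, (pairs.filter (fun p => p.1 == k)).map (fun p => p.2)))

-- ===== PRECONDITION & SPEC =====
def Spec_question_dict (group : List String) (out : List (String × List Int)) : Prop := out = question_dict_alt group
instance (group : List String) (out : List (String × List Int)) : Decidable (Spec_question_dict group out) := by unfold Spec_question_dict; infer_instance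

-- ===== CLAIM (what is proved, stated in full; the proofs are below) =====
def Claim_equal_question_dict : Prop := ∀ (group : List String), Dom_question_dict group → Spec_question_dict group (question_dict group)

-- ===== LEMMAS AND PROOFS =====

-- A's branch ('append to existing list' / 'insert fresh singleton') is exactly Dict.modify with default [].
theorem step_eq_modify {κ : Type} [BEq κ] [LawfulBEq κ] (d : PySem.Dict κ (List Int)) (k : κ) (pid : Int) :
    (if d.contains k then d.modify k [] (fun l => l ++ [pid]) else d.insert k [pid])
      = d.modify k [] (fun l => l ++ [pid]) := by
  by_cases h : d.contains k = true
  · simp [h]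
  · simp only [Bool.not_eq_true] at h
    simp [h, PySem.Dict.modify, PySem.Dict.getD_of_not_contains d [] h]

theorem question_dict_spec' (group : List String) :
    question_dict group = question_dict_alt group := by
  unfold question_dict question_dict_alt
  have hinner : (fun (d : PySem.Dict String (List Int)) (pa : Int × String) =>
      pa.2.toList.foldl
        (fun d a =>
          if d.contains (String.singleton a) then
            d.modify (String.singleton a) [] (fun l => l ++ [pa.1])
          else d.insert (String.singleton a) [pa.1]) d)
      = fun d pa => (pa.2.toList.map (fun a => (String.singleton a, pa.1))).foldl
          (fun d (p : String × Int) =>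
            if d.contains p.1 then d.modify p.1 [] (fun l => l ++ [p.2]) else d.insert p.1 [p.2]) d := by
    funext d pa; rw [List.foldl_map]
  rw [hinner, ← List.foldl_flatMap]
  set pairs := (PySem.List.enumerate group).flatMap
      (fun pa => pa.2.toList.map (fun a => (String.singleton a, pa.1))) with hpairs
  have hstep : (fun (d : PySem.Dict String (List Int)) (p : String × Int) =>
      if d.contains p.1 then d.modify p.1 [] (fun l => l ++ [p.2]) else d.insert p.1 [p.2])
      = fun d p => d.modify p.1 [] (fun l => l ++ [p.2]) := by
    funext d p; exact step_eq_modify d p.1 p.2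
  rw [hstep]
  have hnd : (pairs.foldl (fun d p => d.modify p.1 [] (fun l => l ++ [p.2])) PySem.Dict.empty).keys.Nodup := by
    exact PySem.Dict.nodup_keys_foldl_modify_key pairs (fun p => p.1) []
      (fun _ p l => l ++ [p.2]) PySem.Dict.empty (by simp [PySem.Dict.keys_empty])
  rw [PySem.Dict.items_eq_map_keys _ hnd []]
  have hkeys : (pairs.foldl (fun d p => d.modify p.1 [] (fun l => l ++ [p.2])) PySem.Dict.empty).keys
      = PySem.List.dedup (pairs.map (fun p => p.1)) := by
    rw [PySem.Dict.keys_foldl_modify_key pairs (fun p => p.1) [] (fun _ p l => l ++ [p.2])]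
    rw [PySem.List.dedup_eq_ofList]
    simp [PySem.Dict.keys_empty, PySem.Set.update_nil_left]
  rw [hkeys]
  refine List.map_congr_left (fun k _ => ?_)
  rw [PySem.Dict.getD_foldl_modify_append]
  simp [PySem.Dict.getD_empty]

-- ===== VERDICT (by name: the statement is the Claim_ definition above) =====
theorem question_dict_spec : Claim_equal_question_dict := by
  intro group _
  exact question_dict_spec' group
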